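-- pv_equiv track=rewrite | github.com/DOH-JDJ0303/epitome | bin/epitome_metadata.py | drop_na
-- ===== SOURCE A (Python) =====
-- from typing import List, Dict, Any, Tuple, Optional
--
-- def drop_na(data: List[Dict[str, Any]]) -> List[Dict[str, Any]]:
--     """Remove keys that are None for all records.
--
--     Args:
--         data: List of metadata records.
--
--     Returns:
--         List of records with all-None keys removed.
--     """
--     n_rec = len(data)
--     na_counts: Dict[str, int] = {}
--     rm_set = set()
--
--     for rec in data:
--         for k, v in rec.items():
--             if v is None:
--                 na_counts[k] = na_counts.get(k, 0) + 1
--                 if na_counts[k] == n_rec: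
--                     rm_set.add(k)
--     for rec in data:
--         for k in rm_set:
--             if k in rec:
--                 rec.pop(k)
--     return data
-- ===== SOURCE B (Python) =====
-- def drop_na(data):
--     """Remove keys that are None in every record.
--
--     Rebuilds each record as a filtered copy (the list is updated in place via
--     slice assignment; the original dicts are not mutated, unlike A).
--     """
--     def alive(k):
--         return any(k not in rec or rec[k] is not None for rec in data)
--     data[:] = [{k: v for k, v in rec.items() if alive(k)} for rec in data]
--     return data
-- ===== Notes on version B (the rewrite author's own statement) =====
-- stated objective: alternative
-- what changed: Replaces A's two staged passes with accumulated state (a per-key None counter dict feeding a removal set, then deletion from each record) by a single rebuilding comprehension that keeps an entry iff an inline existential check finds a witness record where the key is absent or non-None; no counter, no removal set, and records are rebuilt as filtered copies instead of having keys popped.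
import Mathlib
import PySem

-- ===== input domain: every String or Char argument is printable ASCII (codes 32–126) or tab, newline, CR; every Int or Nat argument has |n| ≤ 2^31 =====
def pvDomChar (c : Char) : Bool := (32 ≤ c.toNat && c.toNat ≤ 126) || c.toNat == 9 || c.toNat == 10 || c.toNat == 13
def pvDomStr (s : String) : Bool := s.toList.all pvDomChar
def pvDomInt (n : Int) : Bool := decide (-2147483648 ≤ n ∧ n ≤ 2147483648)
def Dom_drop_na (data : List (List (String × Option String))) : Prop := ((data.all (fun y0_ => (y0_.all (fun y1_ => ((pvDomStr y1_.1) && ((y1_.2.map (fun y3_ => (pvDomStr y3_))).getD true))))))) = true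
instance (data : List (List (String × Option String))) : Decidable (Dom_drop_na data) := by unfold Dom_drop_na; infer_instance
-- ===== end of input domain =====

-- B drops A's staged counter-dict/removal-set passes for one rebuilding comprehension with
-- an inline per-key existential check (objective: alternative). A mutates the record dicts
-- in place; B instead replaces the list's records with filtered copies — the equivalence
-- proved here is about the returned value.

-- ===== PORT A =====
-- one step of A's inner loop over rec.items(); n_rec is len(data)
def aStep (n_rec : Int) (st : PySem.Dict String Int × PySem.Set String)
    (kv : String × Option String) : PySem.Dict String Int × PySem.Set String :=
  if kv.2 = none then
    let c := st.1.getD kv.1 0 + 1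
    (st.1.insert kv.1 c, if c = n_rec then PySem.Set.add st.2 kv.1 else st.2)
  else st

def drop_na (data : List (List (String × Option String))) : List (List (String × Option String)) :=
  let n_rec : Int := (data.length : Int)
  let st := data.foldl (fun st rec => rec.foldl (aStep n_rec) st)
    ((PySem.Dict.empty : PySem.Dict String Int), (PySem.Set.empty : PySem.Set String))
  -- `for k in rm_set: if k in rec: rec.pop(k)`; rec is a dict (unique keys, see Pre_),
  -- so pop(k) drops the single entry with key k; the result does not depend on the
  -- set's iteration order (erasing distinct keys commutes)
  data.map (fun rec =>
    st.2.foldl (fun rec k =>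
      if rec.any (fun kv => kv.1 == k) then rec.filter (fun kv => kv.1 != k) else rec) rec)

-- ===== PORT B =====
-- alive(k) = any(k not in rec or rec[k] is not None for rec in data);
-- dict lookup rec[k] = first matching entry
def aliveKey (data : List (List (String × Option String))) (k : String) : Bool :=
  data.any (fun rec =>
    match rec.find? (fun kv => kv.1 == k) with
    | none => true
    | some kv => kv.2 != none)

-- data[:] = [{k: v for k, v in rec.items() if alive(k)} for rec in data]
def drop_na_alt (data : List (List (String × Option String))) : List (List (String × Option String)) :=
  data.map (fun rec => rec.filter (fun kv => aliveKey data kv.1))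

-- ===== PRECONDITION & SPEC =====
-- Pre_ excludes association lists in which some record has a duplicated key: such a list
-- does not represent a Python dict (dict keys are unique), so A never receives it.
def Pre_drop_na (data : List (List (String × Option String))) : Prop :=
  ∀ rec ∈ data, (rec.map Prod.fst).Nodup
instance (data : List (List (String × Option String))) : Decidable (Pre_drop_na data) := by unfold Pre_drop_na; infer_instance

def pvWitness_drop_na : (List (List (String × Option String))) :=
  [[("a", none), ("b", some "x")], [("a", none)]]

def Spec_drop_na (data : List (List (String × Option String))) (out : List (List (String × Option String))) : Prop := out = drop_na_alt data
instance (data : List (List (String × Option String))) (out : List (List (String × Option String))) : Decidable (Spec_drop_na data out) := by unfold Spec_drop_na; infer_instance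

-- ===== CLAIM (what is proved, stated in full; the proofs are below) =====
def Claim_equal_drop_na : Prop := ∀ (data : List (List (String × Option String))), Dom_drop_na data → Pre_drop_na data → Spec_drop_na data (drop_na data)

-- ===== LEMMAS AND PROOFS =====

-- record rec maps key k to None (present with value none)
def hasNoneKey (k : String) (rec : List (String × Option String)) : Bool :=
  rec.any (fun kv => kv.1 == k && kv.2 == none)

-- number of records of ds that map k to None (A's final na_counts entry)
def cntNone (k : String) (ds : List (List (String × Option String))) : Int :=
  (ds.countP (fun rec => hasNoneKey k rec) : Int)

theorem foldl_erase_eq_filter (l : List String) (rec : List (String × Option String)) :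
    l.foldl (fun rec k => rec.filter (fun kv => kv.1 != k)) rec
      = rec.filter (fun kv => !(l.contains kv.1)) := by
  induction l generalizing rec with
  | nil => simp
  | cons a l ih =>
    simp only [List.foldl_cons, ih, List.filter_filter]
    apply List.filter_congr
    intro kv _
    simp [Bool.and_comm, bne, beq_eq_decide]

theorem aPop_eq_filter :
    (fun (rec : List (String × Option String)) (k : String) =>
      if rec.any (fun kv => kv.1 == k) then rec.filter (fun kv => kv.1 != k) else rec)
    = (fun rec k => rec.filter (fun kv => kv.1 != k)) := by
  funext rec k
  split_ifs with h
  · rfl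
  · symm; apply List.filter_eq_self.2
    intro kv hkv
    simp only [List.any_eq_true, not_exists, not_and] at h
    simpa using fun he => by simpa [he] using h kv hkv

theorem hasNoneKey_false_of_not_mem {k : String} {rec : List (String × Option String)}
    (h : k ∉ rec.map Prod.fst) : hasNoneKey k rec = false := by
  simp only [hasNoneKey, List.any_eq_false]
  rintro ⟨k', v⟩ hm
  simp only [List.mem_map] at h
  have : k' ≠ k := fun he => h ⟨(k', v), hm, he⟩
  simp [this]

theorem aInner_char (n_rec : Int) (rec : List (String × Option String))
    (hnd : (rec.map Prod.fst).Nodup) (counts : PySem.Dict String Int) (rm : PySem.Set String) :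
    (∀ k, (rec.foldl (aStep n_rec) (counts, rm)).1.getD k 0
        = counts.getD k 0 + (if hasNoneKey k rec then 1 else 0)) ∧
    (∀ k, ((rec.foldl (aStep n_rec) (counts, rm)).2.contains k)
        = (rm.contains k || (hasNoneKey k rec && (counts.getD k 0 + 1 == n_rec)))) := by
  induction rec generalizing counts rm with
  | nil => simp [hasNoneKey]
  | cons kv rest ih =>
    simp only [List.map_cons, List.nodup_cons] at hnd
    obtain ⟨hkv, hrest⟩ := hnd
    by_cases hv : kv.2 = none
    · have hstep : aStep n_rec (counts, rm) kv
          = (counts.insert kv.1 (counts.getD kv.1 0 + 1),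
             if counts.getD kv.1 0 + 1 = n_rec then PySem.Set.add rm kv.1 else rm) := by
        simp [aStep, hv]
      obtain ⟨ih1, ih2⟩ := ih hrest (counts.insert kv.1 (counts.getD kv.1 0 + 1))
        (if counts.getD kv.1 0 + 1 = n_rec then PySem.Set.add rm kv.1 else rm)
      constructor
      · intro k
        rw [List.foldl_cons, hstep, ih1 k]
        by_cases hk : k = kv.1
        · subst hk
          rw [PySem.Dict.getD_insert_self, hasNoneKey_false_of_not_mem hkv]
          simp [hasNoneKey, hv]
        · rw [PySem.Dict.getD_insert_of_ne _ _ _ hk]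
          have hb : (kv.1 == k) = false := by
            simp only [beq_eq_false_iff_ne]; exact fun h => hk h.symm
          have : hasNoneKey k (kv :: rest) = hasNoneKey k rest := by
            simp [hasNoneKey, List.any_cons, hb]
          rw [this]
      · intro k
        rw [List.foldl_cons, hstep, ih2 k]
        by_cases hk : k = kv.1
        · subst hk
          rw [hasNoneKey_false_of_not_mem hkv, PySem.Dict.getD_insert_self]
          have hcons : hasNoneKey kv.1 (kv :: rest) = true := by simp [hasNoneKey, hv]
          rw [hcons]
          split_ifs with hc
          · rw [Bool.eq_iff_iff]
            simp [PySem.Set.mem_add, hc]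
          · simp [hc]
        · rw [PySem.Dict.getD_insert_of_ne _ _ _ hk]
          have hb : (kv.1 == k) = false := by
            simp only [beq_eq_false_iff_ne]; exact fun h => hk h.symm
          have : hasNoneKey k (kv :: rest) = hasNoneKey k rest := by
            simp [hasNoneKey, List.any_cons, hb]
          rw [this]
          split_ifs with hc
          · rw [Bool.eq_iff_iff, Bool.eq_iff_iff]
            simp [PySem.Set.mem_add, hk]
          · rfl
    · have hstep : aStep n_rec (counts, rm) kv = (counts, rm) := by simp [aStep, hv]
      obtain ⟨ih1, ih2⟩ := ih hrest counts rm
      have hcons : ∀ k, hasNoneKey k (kv :: rest) = hasNoneKey k rest := by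
        intro k; simp [hasNoneKey, List.any_cons, hv]
      constructor
      · intro k; rw [List.foldl_cons, hstep, ih1 k, hcons k]
      · intro k; rw [List.foldl_cons, hstep, ih2 k, hcons k]

theorem aOuter_char (data : List (List (String × Option String))) (hne : data ≠ [])
    (hnd : ∀ rec ∈ data, (rec.map Prod.fst).Nodup) :
    ∀ (suf pre : List (List (String × Option String))) (counts : PySem.Dict String Int)
      (rm : PySem.Set String), data = pre ++ suf →
      (∀ k, counts.getD k 0 = cntNone k pre) →
      (∀ k, rm.contains k = ((pre.length == data.length) && pre.all (fun rec => hasNoneKey k rec))) →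
      (∀ k, ((suf.foldl (fun st rec => rec.foldl (aStep (data.length : Int)) st) (counts, rm)).2.contains k)
          = ((0 < data.length : Bool) && data.all (fun rec => hasNoneKey k rec))) := by
  intro suf
  induction suf with
  | nil =>
    intro pre counts rm hdata hc hrm k
    simp only [List.append_nil] at hdata
    subst hdata
    rw [List.foldl_nil, hrm k]
    have h0 : (0 < data.length : Bool) = true := by
      simp [List.length_pos_iff, hne]
    simp [h0]
  | cons rec suf ih =>
    intro pre counts rm hdata hc hrm k
    have hmem : rec ∈ data := by rw [hdata]; simp
    obtain ⟨h1, h2⟩ := aInner_char (data.length : Int) rec (hnd rec hmem) counts rm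
    rw [List.foldl_cons]
    have hlen : data.length = pre.length + 1 + suf.length := by rw [hdata]; simp; omega
    refine ih (pre ++ [rec]) _ _ (by simp [hdata]) ?_ ?_ k
    · intro k'
      rw [h1 k', hc k']
      simp [cntNone, List.countP_append, List.countP_cons]
    · intro k'
      rw [h2 k', hc k', hrm k']
      have hne : (pre.length == data.length) = false := by simp; omega
      rw [hne]
      simp only [Bool.false_and, Bool.false_or, List.length_append, List.length_cons,
        List.length_nil, List.all_append, List.all_cons, List.all_nil, Bool.and_true]
      by_cases hsuf : suf = []
      · subst hsuf
        simp only [List.length_nil, Nat.add_zero] at hlen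
        have hlen2 : (pre.length + 1 == data.length) = true := by simp; omega
        rw [hlen2, Bool.true_and, Bool.eq_iff_iff]
        simp only [Bool.and_eq_true, List.all_eq_true, beq_iff_eq, cntNone]
        have hle := List.countP_le_length (p := fun rec => hasNoneKey k' rec) (l := pre)
        constructor
        · rintro ⟨hrec, hcnt⟩
          have hcp : pre.countP (fun rec => hasNoneKey k' rec) = pre.length := by omega
          exact ⟨List.countP_eq_length.mp hcp, hrec⟩
        · rintro ⟨hall, hrec⟩
          have hcp : pre.countP (fun rec => hasNoneKey k' rec) = pre.length :=
            List.countP_eq_length.mpr hall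
          exact ⟨hrec, by omega⟩
      · have hlt : pre.length + 1 < data.length := by
          have : 0 < suf.length := List.length_pos_iff.2 hsuf
          omega
        have hlen2 : (pre.length + 1 == data.length) = false := by simp; omega
        rw [hlen2, Bool.false_and]
        have hle := List.countP_le_length (p := fun rec => hasNoneKey k' rec) (l := pre)
        have : ((cntNone k' pre + 1 : Int) == (data.length : Int)) = false := by
          simp only [beq_eq_false_iff_ne, ne_eq, cntNone]
          intro h; omega
        rw [this, Bool.and_false]

-- B's per-record check (absent, or first match non-None) is ¬hasNoneKey under unique keys
theorem bodyRec_eq (k : String) (rec : List (String × Option String))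
    (hnd : (rec.map Prod.fst).Nodup) :
    (match rec.find? (fun kv => kv.1 == k) with
     | none => true
     | some kv => kv.2 != none) = !hasNoneKey k rec := by
  induction rec with
  | nil => simp [hasNoneKey]
  | cons a l ih =>
    obtain ⟨a1, a2⟩ := a
    simp only [List.map_cons, List.nodup_cons] at hnd
    obtain ⟨ha, hl⟩ := hnd
    by_cases hk : a1 = k
    · have hfind : ((a1, a2) :: l).find? (fun kv => kv.1 == k) = some (a1, a2) := by
        simp [hk]
      rw [hfind]
      have hln : hasNoneKey k l = false :=
        hasNoneKey_false_of_not_mem (by rw [← hk]; exact ha)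
      have hcons : hasNoneKey k ((a1, a2) :: l) = ((a1 == k && a2 == none) || hasNoneKey k l) := by
        simp [hasNoneKey, List.any_cons]
      rw [hcons, hln]
      cases a2 <;> simp [hk]
    · have hb : (a1 == k) = false := by simpa using hk
      have hfind : ((a1, a2) :: l).find? (fun kv => kv.1 == k) = l.find? (fun kv => kv.1 == k) := by
        simp [hb]
      have hcons : hasNoneKey k ((a1, a2) :: l) = hasNoneKey k l := by
        simp [hasNoneKey, List.any_cons, hb]
      rw [hfind, hcons, ih hl]

theorem aliveKey_eq (data : List (List (String × Option String)))
    (hnd : ∀ rec ∈ data, (rec.map Prod.fst).Nodup) (k : String) :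
    aliveKey data k = !(data.all (fun rec => hasNoneKey k rec)) := by
  unfold aliveKey
  induction data with
  | nil => simp
  | cons r rs ih =>
    have hr := hnd r (by simp)
    rw [List.any_cons, List.all_cons, ih (fun rec h => hnd rec (by simp [h])),
      bodyRec_eq k r hr]
    cases hasNoneKey k r <;> simp

theorem drop_na_eq (data : List (List (String × Option String)))
    (hnd : ∀ rec ∈ data, (rec.map Prod.fst).Nodup) :
    drop_na data = drop_na_alt data := by
  match data with
  | [] => rfl
  | r :: rs =>
    have hne : r :: rs ≠ [] := by simp
    show (r :: rs).map (fun rec =>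
        ((r :: rs).foldl (fun st rec => rec.foldl (aStep ((r :: rs).length : Int)) st)
          (PySem.Dict.empty, PySem.Set.empty)).2.foldl
          (fun rec k => if rec.any (fun kv => kv.1 == k) then rec.filter (fun kv => kv.1 != k) else rec) rec)
      = (r :: rs).map (fun rec => rec.filter (fun kv => aliveKey (r :: rs) kv.1))
    have hA := aOuter_char (r :: rs) hne hnd (r :: rs) [] PySem.Dict.empty PySem.Set.empty
      (by simp) (fun k => rfl)
      (fun k => by simp [PySem.Set.empty])
    have hcont : ∀ k, ((r :: rs).foldl (fun st rec => rec.foldl (aStep ((r :: rs).length : Int)) st)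
          (PySem.Dict.empty, PySem.Set.empty)).2.contains k
        = !(aliveKey (r :: rs) k) := by
      intro k
      rw [hA k, aliveKey_eq (r :: rs) hnd k]
      simp
    apply List.map_congr_left
    intro rec _
    rw [aPop_eq_filter, foldl_erase_eq_filter]
    apply List.filter_congr
    intro kv _
    have h := hcont kv.1
    rw [PySem.Set.contains_eq_listContains] at h
    rw [h, Bool.not_not]

-- ===== VERDICT (by name: the statement is the Claim_ definition above) =====
theorem drop_na_spec : Claim_equal_drop_na := by
  intro data _ hpre
  show drop_na data = drop_na_alt data
  exact drop_na_eq data hpre
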